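-- pv_equiv track=rewrite | github.com/CAVEconnectome/nglui | src/nglui/precomputed/_sharding.py | choose_output_spec
-- ===== SOURCE A (Python) =====
-- from typing import Literal, NamedTuple, Optional
--
-- MINISHARD_TARGET_COUNT = 1000
--
-- SHARD_TARGET_SIZE = 50_000_000  # ~50MB per shard file
--
-- class ShardSpec(NamedTuple):
--     """Neuroglancer uint64 sharded v1 specification."""
--
--     type: str
--     hash: Literal["murmurhash3_x86_128", "identity_hash"]
--     preshift_bits: int
--     shard_bits: int
--     minishard_bits: int
--     data_encoding: Literal["raw", "gzip"]
--     minishard_index_encoding: Literal["raw", "gzip"]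
--
--     def to_json(self) -> dict:
--         return {
--             "@type": self.type,
--             "hash": self.hash,
--             "preshift_bits": self.preshift_bits,
--             "shard_bits": self.shard_bits,
--             "minishard_bits": self.minishard_bits,
--             "data_encoding": str(self.data_encoding),
--             "minishard_index_encoding": str(self.minishard_index_encoding),
--         }
--
-- def choose_output_spec(
--     total_count: int,
--     total_bytes: int,
--     hashtype: Literal["murmurhash3_x86_128", "identity_hash"] = "murmurhash3_x86_128",
--     gzip_compress: bool = True,
-- ) -> Optional[ShardSpec]:
--     """Compute sharding parameters from annotation count and data size.
--
--     Returns None if sharding is not needed (single entry or tensorstore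
--     unavailable).
--
--     Parameters
--     ----------
--     total_count : int
--         Number of entries.
--     total_bytes : int
--         Total bytes of encoded data.
--     hashtype : str
--         Hash function for shard assignment.
--     gzip_compress : bool
--         Whether to use gzip compression for data and index.
--
--     Returns
--     -------
--     ShardSpec or None
--     """
--     if total_count <= 1:
--         return None
--
--     total_minishard_bits = 0
--     while (total_count >> total_minishard_bits) > MINISHARD_TARGET_COUNT:
--         total_minishard_bits += 1
--
--     shard_bits = 0
--     while (total_bytes >> shard_bits) > SHARD_TARGET_SIZE:
--         shard_bits += 1
--
--     preshift_bits = 0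
--     while MINISHARD_TARGET_COUNT >> preshift_bits:
--         preshift_bits += 1
--
--     minishard_bits = total_minishard_bits - min(total_minishard_bits, shard_bits)
--
--     data_encoding: Literal["raw", "gzip"] = "gzip" if gzip_compress else "raw"
--     minishard_index_encoding: Literal["raw", "gzip"] = (
--         "gzip" if gzip_compress else "raw"
--     )
--
--     return ShardSpec(
--         type="neuroglancer_uint64_sharded_v1",
--         hash=hashtype,
--         preshift_bits=preshift_bits,
--         shard_bits=shard_bits,
--         minishard_bits=minishard_bits,
--         data_encoding=data_encoding,
--         minishard_index_encoding=minishard_index_encoding,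
--     )
-- ===== SOURCE B (Python) =====
-- from typing import Literal, NamedTuple, Optional
--
-- MINISHARD_TARGET_COUNT = 1000
--
-- SHARD_TARGET_SIZE = 50_000_000
--
--
-- class ShardSpec(NamedTuple):
--     """Neuroglancer uint64 sharded v1 specification."""
--
--     type: str
--     hash: Literal["murmurhash3_x86_128", "identity_hash"]
--     preshift_bits: int
--     shard_bits: int
--     minishard_bits: int
--     data_encoding: Literal["raw", "gzip"]
--     minishard_index_encoding: Literal["raw", "gzip"]
--
--
-- def _bits_over(n: int, target: int) -> int:
--     """Smallest k >= 0 with (n >> k) <= target (0 for non-positive n)."""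
--     return (max(n, 0) // (target + 1)).bit_length()
--
--
-- def choose_output_spec(
--     total_count: int,
--     total_bytes: int,
--     hashtype: Literal["murmurhash3_x86_128", "identity_hash"] = "murmurhash3_x86_128",
--     gzip_compress: bool = True,
-- ) -> Optional[ShardSpec]:
--     """Closed-form (bit-length) version of the sharding parameter choice."""
--     if total_count <= 1:
--         return None
--     total_minishard_bits = _bits_over(total_count, MINISHARD_TARGET_COUNT)
--     shard_bits = _bits_over(total_bytes, SHARD_TARGET_SIZE)
--     preshift_bits = MINISHARD_TARGET_COUNT.bit_length()
--     minishard_bits = max(total_minishard_bits - shard_bits, 0)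
--     encoding = "gzip" if gzip_compress else "raw"
--     return ShardSpec(
--         type="neuroglancer_uint64_sharded_v1",
--         hash=hashtype,
--         preshift_bits=preshift_bits,
--         shard_bits=shard_bits,
--         minishard_bits=minishard_bits,
--         data_encoding=encoding,
--         minishard_index_encoding=encoding,
--     )
-- ===== Notes on version B (the rewrite author's own statement) =====
-- stated objective: simpler
-- what changed: Each of A's three bit-counting while-loops is replaced by a closed-form expression: preshift_bits is MINISHARD_TARGET_COUNT.bit_length(), and each 'smallest k with (n >> k) <= target' is (max(n, 0) // (target + 1)).bit_length(); the minishard subtraction becomes max(t - s, 0).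
import Mathlib
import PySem

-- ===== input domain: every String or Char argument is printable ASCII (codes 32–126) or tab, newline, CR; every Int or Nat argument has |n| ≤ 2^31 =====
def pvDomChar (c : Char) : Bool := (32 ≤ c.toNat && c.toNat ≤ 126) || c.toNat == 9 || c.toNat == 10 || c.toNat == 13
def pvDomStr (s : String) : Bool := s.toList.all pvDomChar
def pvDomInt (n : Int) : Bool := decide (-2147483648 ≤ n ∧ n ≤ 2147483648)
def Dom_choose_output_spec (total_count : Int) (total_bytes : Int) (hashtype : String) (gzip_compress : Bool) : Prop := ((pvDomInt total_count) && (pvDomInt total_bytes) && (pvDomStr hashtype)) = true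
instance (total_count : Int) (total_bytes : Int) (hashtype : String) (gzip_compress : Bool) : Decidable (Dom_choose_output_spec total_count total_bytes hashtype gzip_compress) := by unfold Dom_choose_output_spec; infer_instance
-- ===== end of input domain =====

-- B replaces A's three bit-counting while-loops by closed-form bit_length arithmetic (simpler, constant-time).


-- ===== PORT A =====
def pvMINISHARD_TARGET_COUNT : Int := 1000
def pvSHARD_TARGET_SIZE : Int := 50000000

-- while (n >> k) > T: k += 1   (fuel of 64 only makes the loop total; on the domain |n| ≤ 2^31 it is never exhausted)
def pvLoopGT (n T : Int) : Nat → Nat → Nat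
  | 0, k => k
  | f+1, k => if T < n >>> k then pvLoopGT n T f (k+1) else k

-- while (n >> k): k += 1   (same fuel remark)
def pvLoopNZ (n : Int) : Nat → Nat → Nat
  | 0, k => k
  | f+1, k => if n >>> k ≠ 0 then pvLoopNZ n f (k+1) else k

def choose_output_spec (total_count : Int) (total_bytes : Int) (hashtype : String) (gzip_compress : Bool) : Option (String × String × Int × Int × Int × String × String) :=
  if total_count ≤ 1 then none
  else
    let total_minishard_bits : Int := (pvLoopGT total_count pvMINISHARD_TARGET_COUNT 64 0 : Nat)
    let shard_bits : Int := (pvLoopGT total_bytes pvSHARD_TARGET_SIZE 64 0 : Nat)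
    let preshift_bits : Int := (pvLoopNZ pvMINISHARD_TARGET_COUNT 64 0 : Nat)
    let minishard_bits : Int := total_minishard_bits - min total_minishard_bits shard_bits
    let data_encoding : String := if gzip_compress then "gzip" else "raw"
    let minishard_index_encoding : String := if gzip_compress then "gzip" else "raw"
    some ("neuroglancer_uint64_sharded_v1", hashtype, preshift_bits, shard_bits, minishard_bits, data_encoding, minishard_index_encoding)

-- ===== PORT B =====
-- (max(n, 0) // (target + 1)).bit_length()
def pvBitsOver (n target : Int) : Int :=
  (PySem.Int.bitLength (PySem.Int.floordiv (max n 0) (target + 1)) : Int)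

def choose_output_spec_alt (total_count : Int) (total_bytes : Int) (hashtype : String) (gzip_compress : Bool) : Option (String × String × Int × Int × Int × String × String) :=
  if total_count ≤ 1 then none
  else
    let total_minishard_bits : Int := pvBitsOver total_count 1000
    let shard_bits : Int := pvBitsOver total_bytes 50000000
    let preshift_bits : Int := (PySem.Int.bitLength 1000 : Nat)
    let minishard_bits : Int := max (total_minishard_bits - shard_bits) 0
    let encoding : String := if gzip_compress then "gzip" else "raw"
    some ("neuroglancer_uint64_sharded_v1", hashtype, preshift_bits, shard_bits, minishard_bits, encoding, encoding)

-- ===== PRECONDITION & SPEC =====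
-- hand-built decidability helpers (instance search does not reach this nesting depth)
def pvTupleDecEq : DecidableEq (String × String × Int × Int × Int × String × String) :=
  fun a b => decidable_of_iff
    (a.1 = b.1 ∧ a.2.1 = b.2.1 ∧ a.2.2.1 = b.2.2.1 ∧ a.2.2.2.1 = b.2.2.2.1 ∧
      a.2.2.2.2.1 = b.2.2.2.2.1 ∧ a.2.2.2.2.2.1 = b.2.2.2.2.2.1 ∧ a.2.2.2.2.2.2 = b.2.2.2.2.2.2)
    (by simp [Prod.ext_iff])

def pvOptionDecEq {α : Type} (d : DecidableEq α) : DecidableEq (Option α)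
  | none, none => isTrue rfl
  | none, some _ => isFalse (by simp)
  | some _, none => isFalse (by simp)
  | some a, some b =>
    match d a b with
    | isTrue h => isTrue (by rw [h])
    | isFalse h => isFalse (by simpa)

def Spec_choose_output_spec (total_count : Int) (total_bytes : Int) (hashtype : String) (gzip_compress : Bool) (out : Option (String × String × Int × Int × Int × String × String)) : Prop := out = choose_output_spec_alt total_count total_bytes hashtype gzip_compress
instance (total_count : Int) (total_bytes : Int) (hashtype : String) (gzip_compress : Bool) (out : Option (String × String × Int × Int × Int × String × String)) : Decidable (Spec_choose_output_spec total_count total_bytes hashtype gzip_compress out) := by unfold Spec_choose_output_spec; exact pvOptionDecEq pvTupleDecEq _ _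

-- ===== CLAIM (what is proved, stated in full; the proofs are below) =====
def Claim_equal_choose_output_spec : Prop := ∀ (total_count : Int) (total_bytes : Int) (hashtype : String) (gzip_compress : Bool), Dom_choose_output_spec total_count total_bytes hashtype gzip_compress → Spec_choose_output_spec total_count total_bytes hashtype gzip_compress (choose_output_spec total_count total_bytes hashtype gzip_compress)

-- ===== LEMMAS AND PROOFS =====

-- k < bit_length m  ↔  2^k ≤ |m|
lemma pv_lt_bitLength_iff (m : Int) (k : Nat) :
    k < PySem.Int.bitLength m ↔ 2 ^ k ≤ m.natAbs := by
  constructor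
  · intro h
    have hm0 : m ≠ 0 := by
      rintro rfl
      simp [PySem.Int.bitLength_zero] at h
    calc 2 ^ k ≤ 2 ^ (PySem.Int.bitLength m - 1) :=
          Nat.pow_le_pow_right (by norm_num) (by omega)
      _ ≤ m.natAbs := PySem.Int.two_pow_bitLength_le m hm0
  · intro h
    have h2 := PySem.Int.lt_two_pow_bitLength m
    exact (Nat.pow_lt_pow_iff_right (by norm_num)).mp (lt_of_le_of_lt h h2)

-- natCast commutes with >>> 
lemma pv_natCast_shiftRight (N k : Nat) : ((N : Int)) >>> k = ((N >>> k : Nat) : Int) := by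
  rw [Int.shiftRight_eq_div_pow, Nat.shiftRight_eq_div_pow]
  exact_mod_cast (Int.natCast_div N (2 ^ k)).symm

-- the loop condition of A, characterised by B's closed form
lemma pv_cond_iff (n T : Int) (hT : 0 < T) (k : Nat) :
    (T < n >>> k) ↔ (k < PySem.Int.bitLength (PySem.Int.floordiv (max n 0) (T + 1))) := by
  by_cases hn : n ≤ 0
  · have hmax : max n 0 = 0 := by omega
    have hsh : n >>> k ≤ 0 := by
      rw [Int.shiftRight_eq_div_pow]
      have := Int.ediv_le_ediv (b := 0) (c := ((2 ^ k : Nat) : Int)) (by positivity) hn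
      simpa using this
    simp [hmax, PySem.Int.floordiv, PySem.Int.bitLength_zero]
    omega
  · replace hn : 0 < n := by omega
    set N := n.toNat with hN
    set S := T.toNat + 1 with hS
    have hn' : n = (N : Int) := by omega
    have hT' : T + 1 = (S : Int) := by omega
    have hmax : max n 0 = n := by omega
    rw [hmax, hn', hT', PySem.Int.floordiv_natCast, pv_natCast_shiftRight,
        pv_lt_bitLength_iff]
    have hpow : 0 < 2 ^ k := Nat.pow_pos (by norm_num)
    rw [Nat.shiftRight_eq_div_pow]
    simp only [Int.natAbs_natCast]
    have hcast : (T < ((N / 2 ^ k : Nat) : Int)) ↔ S ≤ N / 2 ^ k := by omega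
    rw [hcast, Nat.le_div_iff_mul_le hpow, Nat.le_div_iff_mul_le (by omega : 0 < S)]
    have hmc := Nat.mul_comm S (2 ^ k)
    omega

-- the fuelled loop reaches the least k with a false condition
lemma pv_loopGT_eq (n T : Int) (k0 : Nat)
    (hc : ∀ k : Nat, (T < n >>> k) ↔ k < k0) :
    ∀ f k, k ≤ k0 → k0 ≤ k + f → pvLoopGT n T f k = k0 := by
  intro f
  induction f with
  | zero =>
    intro k h1 h2
    have : k = k0 := by omega
    simp [pvLoopGT, this]
  | succ f ih =>
    intro k h1 h2
    by_cases h : k < k0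
    · rw [pvLoopGT, if_pos ((hc k).mpr h)]
      exact ih (k + 1) (by omega) (by omega)
    · have hk : k = k0 := by omega
      rw [pvLoopGT, if_neg (by rw [hc k]; omega)]
      exact hk

-- on the bounded domain, the loop's value IS the closed form
lemma pv_bits_eq (n T : Int) (hT : 0 < T) (hn : n ≤ 2147483648) :
    pvLoopGT n T 64 0 = PySem.Int.bitLength (PySem.Int.floordiv (max n 0) (T + 1)) := by
  set k0 := PySem.Int.bitLength (PySem.Int.floordiv (max n 0) (T + 1)) with hk0
  have hc : ∀ k : Nat, (T < n >>> k) ↔ k < k0 := fun k => pv_cond_iff n T hT k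
  have hb : k0 ≤ 64 := by
    by_contra hgt
    have h64 : T < n >>> (64:Nat) := (hc 64).mpr (by omega)
    have : n >>> (64:Nat) ≤ T := by
      rw [Int.shiftRight_eq_div_pow]
      by_cases h0 : 0 ≤ n
      · rw [Int.ediv_eq_zero_of_lt h0 (by norm_num; omega)]
        omega
      · have := Int.ediv_le_ediv (a := n) (b := 0) (c := ((2 ^ 64 : Nat) : Int)) (by positivity) (by omega)
        simp at this
        omega
    omega
  exact pv_loopGT_eq n T k0 hc 64 0 (by omega) (by omega)

-- ===== VERDICT (by name: the statement is the Claim_ definition above) =====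
theorem choose_output_spec_spec : Claim_equal_choose_output_spec := by
  intro total_count total_bytes hashtype gzip_compress hdom
  unfold Spec_choose_output_spec choose_output_spec choose_output_spec_alt
  by_cases h1 : total_count ≤ 1
  · simp [h1]
  · have hdomc : pvDomInt total_count = true ∧ pvDomInt total_bytes = true := by
      unfold Dom_choose_output_spec at hdom
      simp only [Bool.and_eq_true] at hdom
      exact ⟨hdom.1.1, hdom.1.2⟩
    have hc : total_count ≤ 2147483648 := by
      have := hdomc.1; simp [pvDomInt] at this; omega
    have hb : total_bytes ≤ 2147483648 := by
      have := hdomc.2; simp [pvDomInt] at this; omega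
    simp only [h1, if_false, pvBitsOver]
    have e1 := pv_bits_eq total_count pvMINISHARD_TARGET_COUNT (by norm_num [pvMINISHARD_TARGET_COUNT]) hc
    have e2 := pv_bits_eq total_bytes pvSHARD_TARGET_SIZE (by norm_num [pvSHARD_TARGET_SIZE]) hb
    have e3 : pvLoopNZ pvMINISHARD_TARGET_COUNT 64 0 = PySem.Int.bitLength 1000 := by decide
    have hT1 : pvMINISHARD_TARGET_COUNT + 1 = (1000 : Int) + 1 := by norm_num [pvMINISHARD_TARGET_COUNT]
    have hT2 : pvSHARD_TARGET_SIZE + 1 = (50000000 : Int) + 1 := by norm_num [pvSHARD_TARGET_SIZE]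
    rw [hT1] at e1
    rw [hT2] at e2
    rw [e1, e2, e3]
    congr 1
    refine Prod.ext rfl (Prod.ext rfl (Prod.ext rfl (Prod.ext rfl (Prod.ext ?_ rfl))))
    simp only
    omega
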